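-- pv_equiv track=rewrite | github.com/nttkor/codyssey | algorithm/프로그래머스/삼각달팽이.py | solution
-- ===== SOURCE A (Python) =====
-- def solution(n):
--     if n == 1:
--         return [1]
--     answer = []
--     table = [[0] * (i+1)  for i in range(n)]
--     cx = 0
--     cy = 0
--     offset = 1
--     li = list()
--     while n > 1:
--         li.extend([(cx, cy+i) for i in range(n-1)])
--         cy += n-1
--         li.extend([(cx+i, cy) for i in range(n-1)])
--         cx += n-1
--         li.extend([(cx-i, cy-i) for i in range(n-1)])
--         # cx = li[-1][0]; cy = li[-1][1]+1
--         cx -= n-2; cy -= n-3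
--         n -= 3
--         if n == 1:
--             li.append((cx,cy))
--             n -= 1
--     cnt = 1
--     for x,y in li:
--         table[y][x] = cnt
--         cnt += 1
--     for li in table:
--         answer += li
--     return answer
-- ===== SOURCE B (Python) =====
-- def solution(n):
--     # Closed form: each cell's value is computed directly from its ring index
--     # k = min(col, row-col, n-1-row) instead of simulating the spiral walk.
--     def val(r, c):
--         k = min(c, r - c, n - 1 - r)
--         m = n - 3 * k
--         base = 3 * k * (n - 1) - 9 * (k * (k - 1) // 2)
--         if c == k and r - 2 * k < m - 1:
--             return base + (r - 2 * k) + 1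
--         if r - 2 * k == m - 1:
--             return base + (m - 1) + (c - k) + 1
--         return base + 2 * (m - 1) + (m - 1 - (c - k)) + 1
--     return [val(r, c) for r in range(n) for c in range(r + 1)]
-- ===== Notes on version B (the rewrite author's own statement) =====
-- stated objective: alternative
-- what changed: A simulates the spiral ring by ring (building a coordinate list, then filling and flattening a table); B computes each cell's value directly from a closed-form formula on its ring index k = min(col, row-col, n-1-row), with no traversal or table at all.
import Mathlib
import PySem

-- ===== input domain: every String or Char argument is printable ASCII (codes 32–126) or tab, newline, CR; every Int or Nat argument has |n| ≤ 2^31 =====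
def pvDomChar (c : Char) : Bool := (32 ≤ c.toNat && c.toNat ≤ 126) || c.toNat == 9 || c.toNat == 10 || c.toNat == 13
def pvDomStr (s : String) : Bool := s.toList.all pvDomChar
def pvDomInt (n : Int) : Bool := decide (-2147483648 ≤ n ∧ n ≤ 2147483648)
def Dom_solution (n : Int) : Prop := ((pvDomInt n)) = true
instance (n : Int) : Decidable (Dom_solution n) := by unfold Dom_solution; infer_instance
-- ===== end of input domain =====

-- B replaces A's spiral simulation by a per-cell closed-form value (ring index arithmetic); objective: alternative algorithm, similar cost.

-- ===== PORT A =====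
-- Python item assignment lst[i] = v: exact for in-range indices including negative wrap;
-- on out-of-range Python raises IndexError — never reached by A (all writes hit valid triangle cells).
def pyListSet (l : List Int) (i : Int) (v : Int) : List Int :=
  let j := if i < 0 then i + l.length else i
  if 0 ≤ j ∧ j < l.length then l.set j.toNat v else l

-- Python table[y][x] = v on a list of lists (same IndexError caveat as above).
def pyTableSet (t : List (List Int)) (y x v : Int) : List (List Int) :=
  let j := if y < 0 then y + t.length else y
  if 0 ≤ j ∧ j < t.length then t.modify j.toNat (fun row => pyListSet row x v) else t

-- the `while n > 1` loop of A building the coordinate list li (state: n, cx, cy, li)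
def loopA (n cx cy : Int) (li : List (Int × Int)) : List (Int × Int) :=
  if n > 1 then
    let li1 := li ++ (PySem.List.pyRange 0 (n-1) 1).map (fun i => (cx, cy + i))
    let cy1 := cy + (n-1)
    let li2 := li1 ++ (PySem.List.pyRange 0 (n-1) 1).map (fun i => (cx + i, cy1))
    let cx1 := cx + (n-1)
    let li3 := li2 ++ (PySem.List.pyRange 0 (n-1) 1).map (fun i => (cx1 - i, cy1 - i))
    let cx2 := cx1 - (n-2)
    let cy2 := cy1 - (n-3)
    let n1 := n - 3
    if n1 = 1 then loopA (n1 - 1) cx2 cy2 (li3 ++ [(cx2, cy2)])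
    else loopA n1 cx2 cy2 li3
  else li
termination_by n.toNat
decreasing_by all_goals omega

def solution (n : Int) : List Int :=
  if n = 1 then [1]
  else
    let table := (PySem.List.pyRange 0 n 1).map (fun i => PySem.List.pyRepeat [(0 : Int)] (i+1))
    let li := loopA n 0 0 []
    let res := li.foldl (fun (s : List (List Int) × Int) p => (pyTableSet s.1 p.2 p.1 s.2, s.2 + 1)) (table, 1)
    res.1.foldl (fun a r => a ++ r) []

-- ===== PORT B =====
def valB (n r c : Int) : Int :=
  let k := min c (min (r - c) (n - 1 - r))
  let m := n - 3 * k
  let base := 3 * k * (n - 1) - 9 * (PySem.Int.floordiv (k * (k - 1)) 2)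
  if c = k ∧ r - 2 * k < m - 1 then base + (r - 2 * k) + 1
  else if r - 2 * k = m - 1 then base + (m - 1) + (c - k) + 1
  else base + 2 * (m - 1) + (m - 1 - (c - k)) + 1

def solution_alt (n : Int) : List Int :=
  (PySem.List.pyRange 0 n 1).flatMap (fun r => (PySem.List.pyRange 0 (r+1) 1).map (fun c => valB n r c))

-- ===== PRECONDITION & SPEC =====
def Spec_solution (n : Int) (out : List Int) : Prop := out = solution_alt n
instance (n : Int) (out : List Int) : Decidable (Spec_solution n out) := by unfold Spec_solution; infer_instance

-- ===== CLAIM (what is proved, stated in full; the proofs are below) =====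
def Claim_equal_solution : Prop := ∀ (n : Int), Dom_solution n → Spec_solution n (solution n)

-- ===== LEMMAS AND PROOFS =====

lemma valB_left (n i : Int) (h0 : 0 ≤ i) (h1 : i < n - 1) : valB n i 0 = i + 1 := by
  simp only [valB]
  rw [show min (0:Int) (min (i - 0) (n - 1 - i)) = 0 from by omega]
  rw [show (0:Int) * (0 - 1) = 0 from by ring]
  rw [show PySem.Int.floordiv 0 2 = 0 from by decide]
  rw [if_pos (by constructor <;> omega)]
  ring

lemma valB_bottom (n j : Int) (h0 : 0 ≤ j) (h1 : j < n - 1) : valB n (n-1) j = (n-1) + j + 1 := by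
  simp only [valB]
  rw [show min j (min (n - 1 - j) (n - 1 - (n - 1))) = 0 from by omega]
  rw [show (0:Int) * (0 - 1) = 0 from by ring]
  rw [show PySem.Int.floordiv 0 2 = 0 from by decide]
  rw [if_neg (by omega), if_pos (by omega)]
  ring

lemma valB_diag (n d : Int) (h0 : 1 ≤ d) (h1 : d ≤ n - 1) : valB n d d = 2*(n-1) + (n-1-d) + 1 := by
  simp only [valB]
  rw [show min d (min (d - d) (n - 1 - d)) = 0 from by omega]
  rw [show (0:Int) * (0 - 1) = 0 from by ring]
  rw [show PySem.Int.floordiv 0 2 = 0 from by decide]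
  by_cases hd : d = n - 1
  · rw [if_neg (by omega), if_pos (by omega)]
    omega
  · rw [if_neg (by omega), if_neg (by omega)]
    ring

lemma valB_shift (n r c : Int) (h1 : 1 ≤ c) (h2 : c + 1 ≤ r) (h3 : r + 1 ≤ n - 1) :
    valB n r c = 3 * (n - 1) + valB (n-3) (r-2) (c-1) := by
  simp only [valB]
  set k := min c (min (r - c) (n - 1 - r)) with hkdef
  have hk1 : 1 ≤ k := by omega
  rw [show min (c-1) (min (r - 2 - (c - 1)) (n - 3 - 1 - (r - 2))) = k - 1 from by omega]
  have hd : PySem.Int.floordiv (k * (k - 1)) 2 = PySem.Int.floordiv ((k-1) * (k - 1 - 1)) 2 + (k - 1) := by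
    rw [PySem.Int.floordiv_eq_ediv_of_pos (by norm_num), PySem.Int.floordiv_eq_ediv_of_pos (by norm_num)]
    rw [show k * (k - 1) = (k-1) * (k - 1 - 1) + (k-1) * 2 from by ring]
    rw [Int.add_mul_ediv_right _ _ (by norm_num)]
  rw [hd]
  set d := PySem.Int.floordiv ((k-1) * (k - 1 - 1)) 2 with hddef
  have hb : 3 * k * (n - 1) - 9 * (d + (k - 1)) = 3 * (n - 1) + (3 * (k-1) * (n - 3 - 1) - 9 * d) := by ring
  split_ifs <;> omega
def ringL (n : Int) : List (Int × Int) :=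
  ((PySem.List.pyRange 0 (n-1) 1).map (fun i => ((0 : Int), i)))
  ++ ((PySem.List.pyRange 0 (n-1) 1).map (fun i => (i, n-1)))
  ++ ((PySem.List.pyRange 0 (n-1) 1).map (fun i => (n-1-i, n-1-i)))

def cells (n : Int) : List (Int × Int) :=
  if n ≤ 0 then []
  else if n = 1 then [((0 : Int), (0 : Int))]
  else ringL n ++ (cells (n-3)).map (fun p => (p.1 + 1, p.2 + 2))
termination_by n.toNat
decreasing_by omega

lemma loopA_eq : ∀ (m : Nat) (n : Int), n.toNat ≤ m → n ≠ 1 → ∀ (a b : Int) (acc : List (Int × Int)),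
    loopA n a b acc = acc ++ (cells n).map (fun p => (p.1 + a, p.2 + b)) := by
  intro m
  induction m with
  | zero =>
    intro n hn hne a b acc
    rw [loopA, cells]
    rw [if_neg (show ¬ (n > 1) from by omega), if_pos (show n ≤ 0 from by omega)]
    simp
  | succ M ih =>
    intro n hn hne a b acc
    by_cases h0 : n ≤ 1
    · rw [loopA, cells]
      rw [if_neg (show ¬ (n > 1) from by omega), if_pos (show n ≤ 0 from by omega)]
      simp
    · rw [loopA, cells]
      rw [if_pos (show n > 1 from by omega), if_neg (show ¬ (n ≤ 0) from by omega), if_neg hne]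
      have hseg : ∀ (u v : Int) (l : List (Int × Int)),
          (ringL n ++ l).map (fun p => (p.1 + u, p.2 + v)) =
          ((PySem.List.pyRange 0 (n-1) 1).map (fun i => (u, v + i)))
          ++ ((PySem.List.pyRange 0 (n-1) 1).map (fun i => (u + i, v + (n-1))))
          ++ ((PySem.List.pyRange 0 (n-1) 1).map (fun i => (u + (n-1) - i, v + (n-1) - i)))
          ++ l.map (fun p => (p.1 + u, p.2 + v)) := by
        intro u v l
        simp only [ringL, List.map_append, List.map_map, List.append_assoc]
        congr 1
        · apply List.map_congr_left; intro x _; simp [Function.comp]; omega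
        congr 1
        · apply List.map_congr_left; intro x _; simp [Function.comp]; constructor <;> omega
        congr 1
        · apply List.map_congr_left; intro x _; simp [Function.comp]; constructor <;> omega
      have hc1 : (cells 0) = [] := by rw [cells]; norm_num
      by_cases h31 : n - 3 = 1
      · rw [if_pos h31]
        rw [ih (n - 3 - 1) (by omega) (by omega)]
        rw [show n - 3 - 1 = 0 from by omega, hc1]
        have hc2 : (cells (n-3)).map (fun p => (p.1 + 1, p.2 + 2)) = [((1:Int),(2:Int))] := by
          rw [h31, cells]; norm_num
        rw [hseg a b ((cells (n-3)).map (fun p => (p.1 + 1, p.2 + 2))), hc2]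
        simp only [List.map_cons, List.map_nil, List.map_nil, List.append_assoc, List.append_nil]
        rw [show (a + (n-1) - (n-2), b + (n-1) - (n-3)) = ((1+a : Int), (2+b : Int)) from by
          simp [Prod.ext_iff]; omega]
      · rw [if_neg h31]
        rw [ih (n - 3) (by omega) h31]
        rw [hseg a b ((cells (n-3)).map (fun p => (p.1 + 1, p.2 + 2)))]
        simp only [List.append_assoc, List.map_map]
        congr 4
        apply List.map_congr_left; intro x _
        simp [Prod.ext_iff, Function.comp]
        constructor <;> omega
lemma cells_get : ∀ (m : Nat) (n : Int), n.toNat ≤ m → ∀ (i : Nat), i < (cells n).length →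
    ∃ r c : Int, 0 ≤ c ∧ c ≤ r ∧ r < n ∧ (cells n)[i]? = some (c, r) ∧ valB n r c = (i : Int) + 1 := by
  intro m
  induction m with
  | zero =>
    intro n hn i hi
    rw [cells, if_pos (show n ≤ 0 from by omega)] at hi
    simp at hi
  | succ M ih =>
    intro n hn i hi
    by_cases h0 : n ≤ 0
    · rw [cells, if_pos h0] at hi; simp at hi
    by_cases h1 : n = 1
    · subst h1
      rw [cells] at hi ⊢
      norm_num at hi ⊢
      refine ⟨0, 0, le_refl _, le_refl _, by norm_num, ?_, ?_⟩
      · rw [show i = 0 from by omega]; rfl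
      · rw [show i = 0 from by omega]; norm_num; decide
    have h2 : 2 ≤ n := by omega
    rw [cells, if_neg h0, if_neg h1] at hi ⊢
    set N1 := (n-1).toNat with hN1
    have hlen1 : ∀ f : Int → Int × Int, ((PySem.List.pyRange 0 (n-1) 1).map f).length = N1 := by
      intro f; simp [PySem.List.length_pyRange_one]; omega
    have hget : ∀ (f : Int → Int × Int) (j : Nat), j < N1 →
        ((PySem.List.pyRange 0 (n-1) 1).map f)[j]? = some (f j) := by
      intro f j hj
      rw [PySem.List.pyRange_one]
      have hj' : j < n.toNat - 1 := by omega
      simp [List.getElem?_map, List.getElem?_range, hj']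
    have hiL : i < (cells (n-3)).length + 3 * N1 := by
      simp only [List.length_append, List.length_map, hlen1, ringL] at hi
      omega
    rcases Nat.lt_or_ge i N1 with hc1 | hc1
    · -- left column segment
      refine ⟨(i : Int), 0, le_refl _, by omega, by omega, ?_, ?_⟩
      · rw [List.getElem?_append_left (by simp only [ringL, List.length_append, hlen1]; omega)]
        rw [ringL, List.getElem?_append_left (by simp only [List.length_append, hlen1]; omega),
            List.getElem?_append_left (by simp only [hlen1]; omega)]
        exact hget _ i hc1
      · rw [valB_left n i (by omega) (by omega)]
    rcases Nat.lt_or_ge i (2 * N1) with hc2 | hc2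
    · -- bottom row segment
      refine ⟨n - 1, ((i - N1 : Nat) : Int), by omega, by omega, by omega, ?_, ?_⟩
      · rw [List.getElem?_append_left (by simp only [ringL, List.length_append, hlen1]; omega)]
        rw [ringL, List.getElem?_append_left (by simp only [List.length_append, hlen1]; omega),
            List.getElem?_append_right (by simp only [hlen1]; omega)]
        simp only [hlen1]
        exact hget _ (i - N1) (by omega)
      · rw [valB_bottom n _ (by omega) (by omega)]; push_cast; omega
    rcases Nat.lt_or_ge i (3 * N1) with hc3 | hc3
    · -- diagonal segment
      refine ⟨n - 1 - ((i - 2*N1 : Nat) : Int), n - 1 - ((i - 2*N1 : Nat) : Int),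
        by omega, le_refl _, by omega, ?_, ?_⟩
      · rw [List.getElem?_append_left (by simp only [ringL, List.length_append, hlen1]; omega)]
        rw [ringL, List.getElem?_append_right (by simp only [List.length_append, hlen1]; omega)]
        simp only [List.length_append, hlen1]
        rw [show i - (N1 + N1) = i - 2*N1 from by omega]
        exact hget _ (i - 2*N1) (by omega)
      · rw [valB_diag n _ (by omega) (by omega)]; push_cast; omega
    · -- inner triangle
      obtain ⟨r', c', hc'0, hcr', hr', hgc, hval⟩ :=
        ih (n-3) (by omega) (i - 3*N1) (by omega)
      refine ⟨r' + 2, c' + 1, by omega, by omega, by omega, ?_, ?_⟩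
      · rw [List.getElem?_append_right (by simp only [ringL, List.length_append, hlen1]; omega)]
        simp only [ringL, List.length_append, hlen1]
        rw [show i - (N1 + N1 + N1) = i - 3*N1 from by omega]
        rw [List.getElem?_map, hgc]
        rfl
      · rw [valB_shift n (r'+2) (c'+1) (by omega) (by omega) (by omega)]
        rw [show r' + 2 - 2 = r' from by omega, show c' + 1 - 1 = c' from by omega, hval]
        push_cast; omega

lemma cells_mem : ∀ (m : Nat) (n : Int), n.toNat ≤ m → ∀ r c : Int, 0 ≤ c → c ≤ r → r < n →
    (c, r) ∈ cells n := by
  intro m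
  induction m with
  | zero => intro n hn r c h0 h1 h2; omega
  | succ M ih =>
    intro n hn r c h0 h1 h2
    by_cases hn1 : n = 1
    · subst hn1
      rw [cells]
      norm_num
      omega
    have h2n : 2 ≤ n := by omega
    rw [cells, if_neg (by omega), if_neg hn1]
    rw [List.mem_append]
    by_cases hin : 1 ≤ c ∧ r ≤ n - 2 ∧ c + 1 ≤ r
    · right
      rw [List.mem_map]
      refine ⟨(c - 1, r - 2), ih (n-3) (by omega) (r-2) (c-1) (by omega) (by omega) (by omega), ?_⟩
      simp [Prod.ext_iff]
    · left
      rw [ringL]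
      simp only [List.mem_append, List.mem_map]
      rcases eq_or_ne r (n-1) with hb | hb
      · rcases eq_or_ne c (n-1) with hd | hd
        · -- bottom-right corner: diagonal segment, i = 0
          right
          exact ⟨0, by rw [PySem.List.mem_pyRange_one]; omega, by simp [Prod.ext_iff]; constructor <;> omega⟩
        · -- bottom row
          left; right
          exact ⟨c, by rw [PySem.List.mem_pyRange_one]; omega, by simp [Prod.ext_iff]; omega⟩
      · rcases eq_or_ne c 0 with hz | hz
        · -- left column
          left; left
          exact ⟨r, by rw [PySem.List.mem_pyRange_one]; omega, by simp [Prod.ext_iff]; omega⟩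
        · -- diagonal (r = c forced)
          right
          refine ⟨n - 1 - r, by rw [PySem.List.mem_pyRange_one]; omega, ?_⟩
          simp [Prod.ext_iff]; omega
def ent (t : List (List Int)) (r c : Nat) : Int := (t.getD r []).getD c 0

def shapeT (n : Int) (t : List (List Int)) : Prop :=
  t.length = n.toNat ∧ ∀ r : Nat, r < n.toNat → (t.getD r []).length = r + 1

lemma pyListSet_eq_set (l : List Int) (x v : Int) (hx : 0 ≤ x) (hxl : x < l.length) :
    pyListSet l x v = l.set x.toNat v := by
  simp only [pyListSet]
  rw [if_neg (show ¬ x < 0 from by omega), if_pos ⟨hx, hxl⟩]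

lemma pyTableSet_eq_modify (t : List (List Int)) (y x v : Int) (hy : 0 ≤ y) (hyl : y < t.length) :
    pyTableSet t y x v = t.modify y.toNat (fun row => pyListSet row x v) := by
  simp only [pyTableSet]
  rw [if_neg (show ¬ y < 0 from by omega), if_pos ⟨hy, hyl⟩]

lemma pyTableSet_ent (n x y v : Int) (t : List (List Int)) (hs : shapeT n t)
    (hx : 0 ≤ x) (hxy : x ≤ y) (hy : y < n) :
    shapeT n (pyTableSet t y x v) ∧
    ∀ r c : Nat, ent (pyTableSet t y x v) r c =
      if r = y.toNat ∧ c = x.toNat then v else ent t r c := by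
  obtain ⟨hlen, hrows⟩ := hs
  have hy0 : 0 ≤ y := le_trans hx hxy
  have hyl : y < t.length := by omega
  rw [pyTableSet_eq_modify t y x v hy0 hyl]
  have hytn : y.toNat < t.length := by omega
  have hrowy : (t.getD y.toNat []).length = y.toNat + 1 := hrows y.toNat (by omega)
  have hgety : t[y.toNat]? = some (t.getD y.toNat []) := by
    rw [List.getD_eq_getElem?_getD, List.getElem?_eq_getElem hytn]
    rfl
  have hxl : x < (t.getD y.toNat []).length := by omega
  have hmod : ∀ r : Nat, (t.modify y.toNat (fun row => pyListSet row x v))[r]? =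
      if r = y.toNat then some ((t.getD y.toNat []).set x.toNat v) else t[r]? := by
    intro r
    rw [List.getElem?_modify]
    rcases eq_or_ne r y.toNat with h | h
    · subst h
      rw [hgety]
      simp only [if_pos rfl, if_true, Option.map_some, Option.some.injEq]
      exact congrArg some (pyListSet_eq_set _ x v hx hxl)
    · rw [if_neg h]
      simp [Ne.symm h]
  constructor
  · constructor
    · simp [hlen]
    · intro r hr
      rw [List.getD_eq_getElem?_getD, hmod r]
      rcases eq_or_ne r y.toNat with h | h
      · subst h
        rw [if_pos rfl]
        simp only [Option.getD_some, List.length_set]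
        omega
      · rw [if_neg h]
        rw [← List.getD_eq_getElem?_getD]
        exact hrows r hr
  · intro r c
    unfold ent
    simp only [List.getD_eq_getElem?_getD]
    rw [hmod r]
    rcases eq_or_ne r y.toNat with h | h
    · subst h
      rw [if_pos rfl, hgety]
      simp only [Option.getD_some]
      rcases eq_or_ne c x.toNat with hc | hc
      · subst hc
        rw [if_pos (show True ∧ x.toNat = x.toNat from ⟨trivial, rfl⟩),
            List.getElem?_set_self (by omega)]
        rfl
      · rw [if_neg (by simp [hc]), List.getElem?_set_ne (by omega)]
    · rw [if_neg h, if_neg (by tauto)]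
lemma foldl_write : ∀ (L : List (Int × Int)) (t : List (List Int)) (c0 : Int) (n : Int),
    shapeT n t →
    (∀ j : Nat, j < L.length → ∃ r c : Int, 0 ≤ c ∧ c ≤ r ∧ r < n ∧ L[j]? = some (c, r) ∧ valB n r c = c0 + j) →
    shapeT n (L.foldl (fun (s : List (List Int) × Int) p => (pyTableSet s.1 p.2 p.1 s.2, s.2 + 1)) (t, c0)).1 ∧
    ∀ r c : Int, 0 ≤ c → c ≤ r → r < n →
      ent (L.foldl (fun (s : List (List Int) × Int) p => (pyTableSet s.1 p.2 p.1 s.2, s.2 + 1)) (t, c0)).1 r.toNat c.toNat =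
      if (c, r) ∈ L then valB n r c else ent t r.toNat c.toNat := by
  intro L
  induction L with
  | nil =>
    intro t c0 n hs _
    exact ⟨hs, fun r c _ _ _ => by simp⟩
  | cons p L ih =>
    intro t c0 n hs H
    obtain ⟨r0, c0', hc0, hcr0, hr0, hp, hv0⟩ := H 0 (by simp)
    simp only [List.getElem?_cons_zero, Option.some.injEq] at hp
    obtain ⟨hs1, hent1⟩ := pyTableSet_ent n c0' r0 c0 t hs hc0 hcr0 hr0
    have hp1 : p.1 = c0' := by rw [hp]
    have hp2 : p.2 = r0 := by rw [hp]
    have hv0' : valB n r0 c0' = c0 := by simpa using hv0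
    simp only [List.foldl_cons, hp1, hp2]
    have H' : ∀ j : Nat, j < L.length → ∃ r c : Int, 0 ≤ c ∧ c ≤ r ∧ r < n ∧
        L[j]? = some (c, r) ∧ valB n r c = (c0 + 1) + j := by
      intro j hj
      obtain ⟨r, c, h1, h2, h3, h4, h5⟩ := H (j+1) (by simp; omega)
      refine ⟨r, c, h1, h2, h3, ?_, ?_⟩
      · rw [← h4]; simp
      · rw [h5]; push_cast; ring
    obtain ⟨hs2, hent2⟩ := ih (pyTableSet t r0 c0' c0) (c0 + 1) n hs1 H'
    refine ⟨hs2, ?_⟩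
    intro r c hc hcr hr
    rw [hent2 r c hc hcr hr]
    by_cases hmem : (c, r) ∈ L
    · rw [if_pos hmem, if_pos (by simp [hmem, ← hp])]
    · rw [if_neg hmem]
      rw [hent1 r.toNat c.toNat]
      rcases eq_or_ne (c, r) (c0', r0) with he | he
      · have hc' : c = c0' := congrArg Prod.fst he
        have hr' : r = r0 := congrArg Prod.snd he
        rw [if_pos (by constructor <;> omega), if_pos (by simp [hp, he]), hc', hr']
        exact hv0'.symm
      · have hne : ¬ (r.toNat = r0.toNat ∧ c.toNat = c0'.toNat) := by
          intro ⟨h1, h2⟩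
          apply he
          have : r = r0 := by omega
          have : c = c0' := by omega
          simp [Prod.ext_iff]; constructor <;> omega
        rw [if_neg hne, if_neg (by
          simp only [hp, List.mem_cons, not_or]
          refine ⟨fun hq => he (by rw [hq]), hmem⟩)]
lemma main_eq (n : Int) : solution n = solution_alt n := by
  by_cases h1 : n = 1
  · subst h1; decide
  by_cases h0 : n ≤ 0
  · rw [solution, if_neg h1, solution_alt]
    rw [loopA, if_neg (show ¬ n > 1 from by omega)]
    rw [PySem.List.pyRange_one]
    rw [show (n - 0).toNat = 0 from by omega]
    simp
  -- n ≥ 2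
  have h2 : 2 ≤ n := by omega
  have hli : loopA n 0 0 [] = cells n := by
    rw [loopA_eq n.toNat n le_rfl h1 0 0 []]
    simp
  rw [solution, if_neg h1]
  show (((loopA n 0 0 []).foldl (fun (s : List (List Int) × Int) p => (pyTableSet s.1 p.2 p.1 s.2, s.2 + 1))
      ((PySem.List.pyRange 0 n 1).map (fun i => PySem.List.pyRepeat [(0 : Int)] (i+1)), 1)).1).foldl
      (fun a r => a ++ r) [] = solution_alt n
  rw [hli]
  set T0 := (PySem.List.pyRange 0 n 1).map (fun i => PySem.List.pyRepeat [(0 : Int)] (i+1)) with hT0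
  have hshape0 : shapeT n T0 := by
    constructor
    · rw [hT0]; simp [PySem.List.length_pyRange_one]
    · intro r hr
      rw [hT0, List.getD_eq_getElem?_getD, PySem.List.pyRange_one]
      have hr' : r < (n - 0).toNat := by omega
      simp only [List.map_map, List.getElem?_map, List.getElem?_range, hr', if_pos,
        Option.map_some, Option.getD_some, Function.comp]
      rw [PySem.List.pyRepeat_singleton]
      simp only [List.length_replicate]
      omega
  have hent0 : ∀ r c : Nat, ent T0 r c = 0 := by
    intro r c
    unfold ent
    rw [List.getD_eq_getElem?_getD (l := T0)]
    cases h : T0[r]? with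
    | none => simp
    | some row =>
      have hrow : row ∈ T0 := List.mem_of_getElem? h
      rw [hT0] at hrow
      rw [List.mem_map] at hrow
      obtain ⟨i, _, hi⟩ := hrow
      simp only [Option.getD_some]
      rw [← hi, PySem.List.pyRepeat_singleton]
      rw [List.getD_eq_getElem?_getD, List.getElem?_replicate]
      split <;> simp
  obtain ⟨hsF, hentF⟩ := foldl_write (cells n) T0 1 n hshape0 (by
    intro j hj
    obtain ⟨r, c, ha, hb, hc, hd, he⟩ := cells_get n.toNat n le_rfl j hj
    exact ⟨r, c, ha, hb, hc, hd, by rw [he]; ring⟩)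
  rw [PySem.List.foldl_append_eq_flatten, List.nil_append]
  rw [solution_alt, List.flatMap_def]
  congr 1
  set F := ((cells n).foldl (fun (s : List (List Int) × Int) p => (pyTableSet s.1 p.2 p.1 s.2, s.2 + 1)) (T0, 1)).1 with hF0
  apply List.ext_getElem
  · rw [hsF.1]
    simp [PySem.List.length_pyRange_one]
  · intro r hF hR
    have hrn : r < n.toNat := by rw [hsF.1] at hF; exact hF
    have hrowlen : F[r].length = r + 1 := by
      have hl := hsF.2 r hrn
      rw [List.getD_eq_getElem _ _ hF] at hl
      exact hl
    apply List.ext_getElem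
    · rw [hrowlen, List.getElem_map, PySem.List.getElem_pyRange_one]
      simp [PySem.List.length_pyRange_one]
    · intro c hcF hcR
      have hcr : c < r + 1 := by rw [← hrowlen]; exact hcF
      have hE := hentF (r : Int) (c : Int) (by omega) (by omega) (by omega)
      rw [if_pos (cells_mem n.toNat n le_rfl (r : Int) (c : Int) (by omega) (by omega) (by omega))] at hE
      simp only [Int.toNat_natCast] at hE
      have hlhs : F[r][c] = valB n r c := by
        rw [← hE]
        unfold ent
        rw [List.getD_eq_getElem _ _ hF, List.getD_eq_getElem _ _ hcF]
      rw [hlhs]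
      simp [List.getElem_map, PySem.List.getElem_pyRange_one]

-- ===== VERDICT (by name: the statement is the Claim_ definition above) =====
theorem solution_spec : Claim_equal_solution := by
  intro n _
  unfold Spec_solution
  exact main_eq n
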